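-- pv_equiv track=rewrite | github.com/priyalbhinde/FinanceHelp | app.py | standardize_financial_terms
-- ===== SOURCE A (Python) =====
-- def standardize_financial_terms(terms):
--     """Standardize financial terms to common formats."""
--     term_mapping = {
--     "revenue": ["revenue", "operating revenue", "total revenue", "income", "net revenue", "gross revenue", "sales revenue", "turnover"],
--     "pat": ["pat", "profit after tax", "net profit", "profit", "net earnings", "earnings after tax", "net income", "bottom line"],
--     "ebitda": ["ebitda", "operating profit", "earnings before interest, tax, depreciation and amortization", "core earnings", "operating income"],
--     "net worth": ["net worth", "networth", "total net worth", "shareholder equity", "equity", "book value"],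
--     "eps": ["eps", "earnings per share", "basic eps", "diluted eps"],
--     "total assets": ["total assets", "assets", "gross assets", "net assets", "asset base"],
--     "total liabilities": ["total liabilities", "liabilities", "debt", "borrowings", "obligations"],
--     "equity": ["equity", "shareholder equity", "total equity", "owner's equity"],
--     "operating expenses": ["operating expenses", "opex", "total expenses", "operating costs"],
--     "finance cost": ["finance cost", "interest expense", "borrowing cost", "debt servicing cost"],
--     "dividend": ["dividend", "dividends declared", "interim dividend", "final dividend", "dividend payout"],
--     "cash flow": ["cash flow", "net cash flow", "operating cash flow", "free cash flow", "fcf"],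
--     "market capitalization": ["market capitalization", "market cap", "valuation"],
--     "gross profit": ["gross profit", "gross earnings", "gross margin"],
--     "operating margin": ["operating margin", "ebitda margin", "operating profit margin"],
--     "net margin": ["net margin", "net profit margin", "profit margin"],
--     "return on equity": ["return on equity", "roe"],
--     "return on assets": ["return on assets", "roa"],
--     "return on investment": ["return on investment", "roi"],
--     "debt to equity ratio": ["debt to equity ratio", "d/e ratio"],
--     "interest coverage ratio": ["interest coverage ratio", "debt service coverage ratio", "icr"],
--     "current ratio": ["current ratio", "liquidity ratio"],
--     "quick ratio": ["quick ratio", "acid-test ratio"],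
--     "aum": ["aum", "assets under management", "total aum", "funds under management"],
--     "loan book": ["loan book", "loan portfolio", "total loans", "loan outstanding"],
--     "npa": ["npa", "non-performing assets", "bad loans"],
--     "provisions": ["provisions", "loan loss provisions", "bad debt reserves"],
--     "interest income": ["interest income", "net interest income", "interest earnings"],
--     "fee and commission income": ["fee income", "commission income", "brokerage income"],
--     "other income": ["other income", "miscellaneous income", "non-operating income"],
--     "capital adequacy ratio": ["capital adequacy ratio", "car", "crar"],
--     "tier 1 capital": ["tier 1 capital", "core capital"],
--     "tier 2 capital": ["tier 2 capital", "supplementary capital"],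
--     "risk-weighted assets": ["risk-weighted assets", "rwa"],
--     "investment book": ["investment book", "investment portfolio"],
-- }
--
--
--     standardized_terms = []
--     for term in terms:
--         term = term.lower().strip()
--         for standard_term, variations in term_mapping.items():
--             if term in variations:
--                 standardized_terms.append(standard_term.upper())
--                 break
--         else:
--             standardized_terms.append(term.upper())
--
--     return standardized_terms
-- ===== SOURCE B (Python) =====
-- # Precomputed reverse lookup table: variation -> STANDARD TERM (first list wins).
-- _REVERSE = {
--     'revenue': 'REVENUE',
--     'operating revenue': 'REVENUE',
--     'total revenue': 'REVENUE',
--     'income': 'REVENUE',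
--     'net revenue': 'REVENUE',
--     'gross revenue': 'REVENUE',
--     'sales revenue': 'REVENUE',
--     'turnover': 'REVENUE',
--     'pat': 'PAT',
--     'profit after tax': 'PAT',
--     'net profit': 'PAT',
--     'profit': 'PAT',
--     'net earnings': 'PAT',
--     'earnings after tax': 'PAT',
--     'net income': 'PAT',
--     'bottom line': 'PAT',
--     'ebitda': 'EBITDA',
--     'operating profit': 'EBITDA',
--     'earnings before interest, tax, depreciation and amortization': 'EBITDA',
--     'core earnings': 'EBITDA',
--     'operating income': 'EBITDA',
--     'net worth': 'NET WORTH',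
--     'networth': 'NET WORTH',
--     'total net worth': 'NET WORTH',
--     'shareholder equity': 'NET WORTH',
--     'equity': 'NET WORTH',
--     'book value': 'NET WORTH',
--     'eps': 'EPS',
--     'earnings per share': 'EPS',
--     'basic eps': 'EPS',
--     'diluted eps': 'EPS',
--     'total assets': 'TOTAL ASSETS',
--     'assets': 'TOTAL ASSETS',
--     'gross assets': 'TOTAL ASSETS',
--     'net assets': 'TOTAL ASSETS',
--     'asset base': 'TOTAL ASSETS',
--     'total liabilities': 'TOTAL LIABILITIES',
--     'liabilities': 'TOTAL LIABILITIES',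
--     'debt': 'TOTAL LIABILITIES',
--     'borrowings': 'TOTAL LIABILITIES',
--     'obligations': 'TOTAL LIABILITIES',
--     'total equity': 'EQUITY',
--     "owner's equity": 'EQUITY',
--     'operating expenses': 'OPERATING EXPENSES',
--     'opex': 'OPERATING EXPENSES',
--     'total expenses': 'OPERATING EXPENSES',
--     'operating costs': 'OPERATING EXPENSES',
--     'finance cost': 'FINANCE COST',
--     'interest expense': 'FINANCE COST',
--     'borrowing cost': 'FINANCE COST',
--     'debt servicing cost': 'FINANCE COST',
--     'dividend': 'DIVIDEND',
--     'dividends declared': 'DIVIDEND',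
--     'interim dividend': 'DIVIDEND',
--     'final dividend': 'DIVIDEND',
--     'dividend payout': 'DIVIDEND',
--     'cash flow': 'CASH FLOW',
--     'net cash flow': 'CASH FLOW',
--     'operating cash flow': 'CASH FLOW',
--     'free cash flow': 'CASH FLOW',
--     'fcf': 'CASH FLOW',
--     'market capitalization': 'MARKET CAPITALIZATION',
--     'market cap': 'MARKET CAPITALIZATION',
--     'valuation': 'MARKET CAPITALIZATION',
--     'gross profit': 'GROSS PROFIT',
--     'gross earnings': 'GROSS PROFIT',
--     'gross margin': 'GROSS PROFIT',
--     'operating margin': 'OPERATING MARGIN',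
--     'ebitda margin': 'OPERATING MARGIN',
--     'operating profit margin': 'OPERATING MARGIN',
--     'net margin': 'NET MARGIN',
--     'net profit margin': 'NET MARGIN',
--     'profit margin': 'NET MARGIN',
--     'return on equity': 'RETURN ON EQUITY',
--     'roe': 'RETURN ON EQUITY',
--     'return on assets': 'RETURN ON ASSETS',
--     'roa': 'RETURN ON ASSETS',
--     'return on investment': 'RETURN ON INVESTMENT',
--     'roi': 'RETURN ON INVESTMENT',
--     'debt to equity ratio': 'DEBT TO EQUITY RATIO',
--     'd/e ratio': 'DEBT TO EQUITY RATIO',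
--     'interest coverage ratio': 'INTEREST COVERAGE RATIO',
--     'debt service coverage ratio': 'INTEREST COVERAGE RATIO',
--     'icr': 'INTEREST COVERAGE RATIO',
--     'current ratio': 'CURRENT RATIO',
--     'liquidity ratio': 'CURRENT RATIO',
--     'quick ratio': 'QUICK RATIO',
--     'acid-test ratio': 'QUICK RATIO',
--     'aum': 'AUM',
--     'assets under management': 'AUM',
--     'total aum': 'AUM',
--     'funds under management': 'AUM',
--     'loan book': 'LOAN BOOK',
--     'loan portfolio': 'LOAN BOOK',
--     'total loans': 'LOAN BOOK',
--     'loan outstanding': 'LOAN BOOK',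
--     'npa': 'NPA',
--     'non-performing assets': 'NPA',
--     'bad loans': 'NPA',
--     'provisions': 'PROVISIONS',
--     'loan loss provisions': 'PROVISIONS',
--     'bad debt reserves': 'PROVISIONS',
--     'interest income': 'INTEREST INCOME',
--     'net interest income': 'INTEREST INCOME',
--     'interest earnings': 'INTEREST INCOME',
--     'fee income': 'FEE AND COMMISSION INCOME',
--     'commission income': 'FEE AND COMMISSION INCOME',
--     'brokerage income': 'FEE AND COMMISSION INCOME',
--     'other income': 'OTHER INCOME',
--     'miscellaneous income': 'OTHER INCOME',
--     'non-operating income': 'OTHER INCOME',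
--     'capital adequacy ratio': 'CAPITAL ADEQUACY RATIO',
--     'car': 'CAPITAL ADEQUACY RATIO',
--     'crar': 'CAPITAL ADEQUACY RATIO',
--     'tier 1 capital': 'TIER 1 CAPITAL',
--     'core capital': 'TIER 1 CAPITAL',
--     'tier 2 capital': 'TIER 2 CAPITAL',
--     'supplementary capital': 'TIER 2 CAPITAL',
--     'risk-weighted assets': 'RISK-WEIGHTED ASSETS',
--     'rwa': 'RISK-WEIGHTED ASSETS',
--     'investment book': 'INVESTMENT BOOK',
--     'investment portfolio': 'INVESTMENT BOOK',
-- }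
--
--
-- def standardize_financial_terms(terms):
--     """Standardize financial terms to common formats."""
--     return [_REVERSE.get(t, t.upper())
--             for t in (term.lower().strip() for term in terms)]
-- ===== Notes on version B (the rewrite author's own statement) =====
-- stated objective: faster
-- what changed: B replaces A's per-term nested scan over 35 variation lists with a single precomputed variation->STANDARD lookup table (written out as a literal dict, first list winning for shared variations) consulted once per normalized term in a list comprehension.
import Mathlib
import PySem

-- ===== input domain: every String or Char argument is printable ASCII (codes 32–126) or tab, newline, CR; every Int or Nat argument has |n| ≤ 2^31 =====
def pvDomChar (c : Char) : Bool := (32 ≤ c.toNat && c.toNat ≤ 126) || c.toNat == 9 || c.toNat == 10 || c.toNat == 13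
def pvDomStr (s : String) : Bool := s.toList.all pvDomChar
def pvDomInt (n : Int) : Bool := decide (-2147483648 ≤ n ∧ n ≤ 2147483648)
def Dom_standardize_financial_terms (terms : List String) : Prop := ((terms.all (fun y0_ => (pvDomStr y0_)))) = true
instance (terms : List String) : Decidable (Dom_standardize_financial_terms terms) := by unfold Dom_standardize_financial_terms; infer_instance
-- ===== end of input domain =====

-- B replaces A's per-term scan over 35 variation lists by a single precomputed
-- variation -> STANDARD lookup table consulted once per term (simpler/faster lookup).

-- ===== PORT A =====
-- the term_mapping dict literal, as an insertion-ordered association list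
def pvMapping : List (String × List String) := [
  ("revenue", ["revenue", "operating revenue", "total revenue", "income", "net revenue", "gross revenue", "sales revenue", "turnover"]),
  ("pat", ["pat", "profit after tax", "net profit", "profit", "net earnings", "earnings after tax", "net income", "bottom line"]),
  ("ebitda", ["ebitda", "operating profit", "earnings before interest, tax, depreciation and amortization", "core earnings", "operating income"]),
  ("net worth", ["net worth", "networth", "total net worth", "shareholder equity", "equity", "book value"]),
  ("eps", ["eps", "earnings per share", "basic eps", "diluted eps"]),
  ("total assets", ["total assets", "assets", "gross assets", "net assets", "asset base"]),
  ("total liabilities", ["total liabilities", "liabilities", "debt", "borrowings", "obligations"]),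
  ("equity", ["equity", "shareholder equity", "total equity", "owner's equity"]),
  ("operating expenses", ["operating expenses", "opex", "total expenses", "operating costs"]),
  ("finance cost", ["finance cost", "interest expense", "borrowing cost", "debt servicing cost"]),
  ("dividend", ["dividend", "dividends declared", "interim dividend", "final dividend", "dividend payout"]),
  ("cash flow", ["cash flow", "net cash flow", "operating cash flow", "free cash flow", "fcf"]),
  ("market capitalization", ["market capitalization", "market cap", "valuation"]),
  ("gross profit", ["gross profit", "gross earnings", "gross margin"]),
  ("operating margin", ["operating margin", "ebitda margin", "operating profit margin"]),
  ("net margin", ["net margin", "net profit margin", "profit margin"]),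
  ("return on equity", ["return on equity", "roe"]),
  ("return on assets", ["return on assets", "roa"]),
  ("return on investment", ["return on investment", "roi"]),
  ("debt to equity ratio", ["debt to equity ratio", "d/e ratio"]),
  ("interest coverage ratio", ["interest coverage ratio", "debt service coverage ratio", "icr"]),
  ("current ratio", ["current ratio", "liquidity ratio"]),
  ("quick ratio", ["quick ratio", "acid-test ratio"]),
  ("aum", ["aum", "assets under management", "total aum", "funds under management"]),
  ("loan book", ["loan book", "loan portfolio", "total loans", "loan outstanding"]),
  ("npa", ["npa", "non-performing assets", "bad loans"]),
  ("provisions", ["provisions", "loan loss provisions", "bad debt reserves"]),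
  ("interest income", ["interest income", "net interest income", "interest earnings"]),
  ("fee and commission income", ["fee income", "commission income", "brokerage income"]),
  ("other income", ["other income", "miscellaneous income", "non-operating income"]),
  ("capital adequacy ratio", ["capital adequacy ratio", "car", "crar"]),
  ("tier 1 capital", ["tier 1 capital", "core capital"]),
  ("tier 2 capital", ["tier 2 capital", "supplementary capital"]),
  ("risk-weighted assets", ["risk-weighted assets", "rwa"]),
  ("investment book", ["investment book", "investment portfolio"])]

-- the inner `for standard_term, variations ... if term in variations: ...; break / else:` loop
def pvFirstMatch (t : String) : List (String × List String) → Option String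
  | [] => none
  | (s, vs) :: rest => if t ∈ vs then some s else pvFirstMatch t rest

def standardize_financial_terms (terms : List String) : List String :=
  terms.foldl (fun acc term =>
    let t := PySem.Str.strip (PySem.Str.lower term)
    match pvFirstMatch t pvMapping with
    | some s => acc ++ [PySem.Str.upper s]
    | none => acc ++ [PySem.Str.upper t]) []

-- ===== PORT B =====
-- Source B's _REVERSE dict literal: variation -> STANDARD TERM, keys distinct
def pvRev : List (String × String) := [
  ("revenue", "REVENUE"),
  ("operating revenue", "REVENUE"),
  ("total revenue", "REVENUE"),
  ("income", "REVENUE"),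
  ("net revenue", "REVENUE"),
  ("gross revenue", "REVENUE"),
  ("sales revenue", "REVENUE"),
  ("turnover", "REVENUE"),
  ("pat", "PAT"),
  ("profit after tax", "PAT"),
  ("net profit", "PAT"),
  ("profit", "PAT"),
  ("net earnings", "PAT"),
  ("earnings after tax", "PAT"),
  ("net income", "PAT"),
  ("bottom line", "PAT"),
  ("ebitda", "EBITDA"),
  ("operating profit", "EBITDA"),
  ("earnings before interest, tax, depreciation and amortization", "EBITDA"),
  ("core earnings", "EBITDA"),
  ("operating income", "EBITDA"),
  ("net worth", "NET WORTH"),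
  ("networth", "NET WORTH"),
  ("total net worth", "NET WORTH"),
  ("shareholder equity", "NET WORTH"),
  ("equity", "NET WORTH"),
  ("book value", "NET WORTH"),
  ("eps", "EPS"),
  ("earnings per share", "EPS"),
  ("basic eps", "EPS"),
  ("diluted eps", "EPS"),
  ("total assets", "TOTAL ASSETS"),
  ("assets", "TOTAL ASSETS"),
  ("gross assets", "TOTAL ASSETS"),
  ("net assets", "TOTAL ASSETS"),
  ("asset base", "TOTAL ASSETS"),
  ("total liabilities", "TOTAL LIABILITIES"),
  ("liabilities", "TOTAL LIABILITIES"),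
  ("debt", "TOTAL LIABILITIES"),
  ("borrowings", "TOTAL LIABILITIES"),
  ("obligations", "TOTAL LIABILITIES"),
  ("total equity", "EQUITY"),
  ("owner's equity", "EQUITY"),
  ("operating expenses", "OPERATING EXPENSES"),
  ("opex", "OPERATING EXPENSES"),
  ("total expenses", "OPERATING EXPENSES"),
  ("operating costs", "OPERATING EXPENSES"),
  ("finance cost", "FINANCE COST"),
  ("interest expense", "FINANCE COST"),
  ("borrowing cost", "FINANCE COST"),
  ("debt servicing cost", "FINANCE COST"),
  ("dividend", "DIVIDEND"),
  ("dividends declared", "DIVIDEND"),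
  ("interim dividend", "DIVIDEND"),
  ("final dividend", "DIVIDEND"),
  ("dividend payout", "DIVIDEND"),
  ("cash flow", "CASH FLOW"),
  ("net cash flow", "CASH FLOW"),
  ("operating cash flow", "CASH FLOW"),
  ("free cash flow", "CASH FLOW"),
  ("fcf", "CASH FLOW"),
  ("market capitalization", "MARKET CAPITALIZATION"),
  ("market cap", "MARKET CAPITALIZATION"),
  ("valuation", "MARKET CAPITALIZATION"),
  ("gross profit", "GROSS PROFIT"),
  ("gross earnings", "GROSS PROFIT"),
  ("gross margin", "GROSS PROFIT"),
  ("operating margin", "OPERATING MARGIN"),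
  ("ebitda margin", "OPERATING MARGIN"),
  ("operating profit margin", "OPERATING MARGIN"),
  ("net margin", "NET MARGIN"),
  ("net profit margin", "NET MARGIN"),
  ("profit margin", "NET MARGIN"),
  ("return on equity", "RETURN ON EQUITY"),
  ("roe", "RETURN ON EQUITY"),
  ("return on assets", "RETURN ON ASSETS"),
  ("roa", "RETURN ON ASSETS"),
  ("return on investment", "RETURN ON INVESTMENT"),
  ("roi", "RETURN ON INVESTMENT"),
  ("debt to equity ratio", "DEBT TO EQUITY RATIO"),
  ("d/e ratio", "DEBT TO EQUITY RATIO"),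
  ("interest coverage ratio", "INTEREST COVERAGE RATIO"),
  ("debt service coverage ratio", "INTEREST COVERAGE RATIO"),
  ("icr", "INTEREST COVERAGE RATIO"),
  ("current ratio", "CURRENT RATIO"),
  ("liquidity ratio", "CURRENT RATIO"),
  ("quick ratio", "QUICK RATIO"),
  ("acid-test ratio", "QUICK RATIO"),
  ("aum", "AUM"),
  ("assets under management", "AUM"),
  ("total aum", "AUM"),
  ("funds under management", "AUM"),
  ("loan book", "LOAN BOOK"),
  ("loan portfolio", "LOAN BOOK"),
  ("total loans", "LOAN BOOK"),
  ("loan outstanding", "LOAN BOOK"),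
  ("npa", "NPA"),
  ("non-performing assets", "NPA"),
  ("bad loans", "NPA"),
  ("provisions", "PROVISIONS"),
  ("loan loss provisions", "PROVISIONS"),
  ("bad debt reserves", "PROVISIONS"),
  ("interest income", "INTEREST INCOME"),
  ("net interest income", "INTEREST INCOME"),
  ("interest earnings", "INTEREST INCOME"),
  ("fee income", "FEE AND COMMISSION INCOME"),
  ("commission income", "FEE AND COMMISSION INCOME"),
  ("brokerage income", "FEE AND COMMISSION INCOME"),
  ("other income", "OTHER INCOME"),
  ("miscellaneous income", "OTHER INCOME"),
  ("non-operating income", "OTHER INCOME"),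
  ("capital adequacy ratio", "CAPITAL ADEQUACY RATIO"),
  ("car", "CAPITAL ADEQUACY RATIO"),
  ("crar", "CAPITAL ADEQUACY RATIO"),
  ("tier 1 capital", "TIER 1 CAPITAL"),
  ("core capital", "TIER 1 CAPITAL"),
  ("tier 2 capital", "TIER 2 CAPITAL"),
  ("supplementary capital", "TIER 2 CAPITAL"),
  ("risk-weighted assets", "RISK-WEIGHTED ASSETS"),
  ("rwa", "RISK-WEIGHTED ASSETS"),
  ("investment book", "INVESTMENT BOOK"),
  ("investment portfolio", "INVESTMENT BOOK")]

def standardize_financial_terms_alt (terms : List String) : List String :=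
  (terms.map (fun term => PySem.Str.strip (PySem.Str.lower term))).map
    (fun t => (List.lookup t pvRev).getD (PySem.Str.upper t))

-- ===== PRECONDITION & SPEC =====
def Spec_standardize_financial_terms (terms : List String) (out : List String) : Prop := out = standardize_financial_terms_alt terms
instance (terms : List String) (out : List String) : Decidable (Spec_standardize_financial_terms terms out) := by unfold Spec_standardize_financial_terms; infer_instance

-- ===== CLAIM =====
def Claim_equal_standardize_financial_terms : Prop := ∀ (terms : List String), Dom_standardize_financial_terms terms → Spec_standardize_financial_terms terms (standardize_financial_terms terms)

-- ===== LEMMAS AND PROOFS =====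

-- the setdefault-style flattening that Source B's literal table was written out from
def pvFlat (m : List (String × List String)) : List (String × String) :=
  m.foldl (fun acc p => p.2.foldl
    (fun acc v => if (List.lookup v acc).isSome then acc else acc ++ [(v, PySem.Str.upper p.1)]) acc) []

theorem pv_lookup_append (t : String) (l₁ l₂ : List (String × String)) :
    List.lookup t (l₁ ++ l₂) = (List.lookup t l₁).or (List.lookup t l₂) := by
  induction l₁ with
  | nil => simp
  | cons p l ih =>
    obtain ⟨k, v⟩ := p
    by_cases h : t = k
    · subst h; simp [List.lookup]
    · simp [List.lookup, beq_eq_false_iff_ne.mpr h, ih]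

theorem pv_lookup_inner (t u : String) (vs : List String) (acc : List (String × String)) :
    List.lookup t (vs.foldl
      (fun acc v => if (List.lookup v acc).isSome then acc else acc ++ [(v, u)]) acc)
      = (List.lookup t acc).or (if t ∈ vs then some u else none) := by
  induction vs generalizing acc with
  | nil => simp
  | cons v vs ih =>
    simp only [List.foldl_cons]
    by_cases hs : (List.lookup v acc).isSome
    · rw [if_pos hs, ih]
      by_cases hv : t = v
      · subst hv
        obtain ⟨w, hw⟩ := Option.isSome_iff_exists.mp hs
        simp [hw]
      · simp [List.mem_cons, hv]
    · rw [if_neg hs, ih, pv_lookup_append]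
      by_cases hv : t = v
      · subst hv
        rw [Option.not_isSome_iff_eq_none.mp hs]
        simp [List.lookup]
      · simp [List.lookup, beq_eq_false_iff_ne.mpr hv, List.mem_cons, hv]

theorem pv_lookup_flat_aux (t : String) (m : List (String × List String))
    (acc : List (String × String)) :
    List.lookup t (m.foldl (fun acc p => p.2.foldl
        (fun acc v => if (List.lookup v acc).isSome then acc else acc ++ [(v, PySem.Str.upper p.1)]) acc) acc)
      = (List.lookup t acc).or ((pvFirstMatch t m).map PySem.Str.upper) := by
  induction m generalizing acc with
  | nil => simp [pvFirstMatch]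
  | cons p m ih =>
    obtain ⟨s, vs⟩ := p
    simp only [List.foldl_cons, ih, pv_lookup_inner, pvFirstMatch]
    by_cases h : t ∈ vs <;> cases List.lookup t acc <;> simp [h]

-- Source B's literal table is exactly the flattening of A's mapping
set_option maxRecDepth 100000 in
set_option maxHeartbeats 2000000 in
theorem pvRev_eq_flat : pvRev = pvFlat pvMapping := by decide

theorem pv_lookup_rev (t : String) :
    List.lookup t pvRev = (pvFirstMatch t pvMapping).map PySem.Str.upper := by
  rw [pvRev_eq_flat]
  unfold pvFlat
  rw [pv_lookup_flat_aux]
  simp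

theorem pv_foldl_append_map (f : String → String) (l : List String) (acc : List String) :
    l.foldl (fun a x => a ++ [f x]) acc = acc ++ l.map f := by
  induction l generalizing acc with
  | nil => simp
  | cons x l ih => simp [ih]

theorem pv_main (terms : List String) :
    standardize_financial_terms terms = standardize_financial_terms_alt terms := by
  unfold standardize_financial_terms standardize_financial_terms_alt
  rw [List.map_map]
  have : (fun (acc : List String) (term : String) =>
      let t := PySem.Str.strip (PySem.Str.lower term)
      match pvFirstMatch t pvMapping with
      | some s => acc ++ [PySem.Str.upper s]
      | none => acc ++ [PySem.Str.upper t])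
      = fun acc term => acc ++ [(fun t => (List.lookup t pvRev).getD (PySem.Str.upper t))
          (PySem.Str.strip (PySem.Str.lower term))] := by
    funext acc term
    simp only [pv_lookup_rev]
    cases pvFirstMatch (PySem.Str.strip (PySem.Str.lower term)) pvMapping <;> simp
  rw [this, pv_foldl_append_map]
  simp [Function.comp]

-- ===== VERDICT =====
theorem standardize_financial_terms_spec : Claim_equal_standardize_financial_terms := by
  intro terms _
  exact pv_main terms
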